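-- pv_equiv track=rewrite | github.com/adiarra14/ekodi | tts/src/text_normalize.py | _number_to_bambara
-- ===== SOURCE A (Python) =====
-- _ONES = {
--     0: "furaw",
--     1: "kelen",
--     2: "fila",
--     3: "saba",
--     4: "naani",
--     5: "duuru",
--     6: "wɔɔrɔ",
--     7: "wolonwula",
--     8: "seegi",
--     9: "kɔnɔntɔn",
-- }
--
-- _TENS = {
--     10: "tan",
--     20: "mugan",
--     30: "bi saba",
--     40: "bi naani",
--     50: "bi duuru",
--     60: "bi wɔɔrɔ",
--     70: "bi wolonwula",
--     80: "bi seegi",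
--     90: "bi kɔnɔntɔn",
-- }
--
-- _BIG = {
--     100: "kɛmɛ",
--     1000: "waa",
-- }
--
-- def _number_to_bambara(n: int) -> str:
--     """Convert an integer (0-9999) to Bambara words.  Best-effort."""
--     if n < 0:
--         return "kɛlɛn kɔnɔ " + _number_to_bambara(-n)
--     if n in _ONES:
--         return _ONES[n]
--     if n < 100:
--         tens, ones = divmod(n, 10)
--         base = _TENS.get(tens * 10, f"bi {_ONES.get(tens, str(tens))}")
--         if ones == 0:
--             return base
--         return f"{base} ni {_ONES.get(ones, str(ones))}"
--     if n < 1000: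
--         hundreds, rest = divmod(n, 100)
--         prefix = f"{_BIG[100]} {_ONES.get(hundreds, str(hundreds))}" if hundreds > 1 else _BIG[100]
--         if rest == 0:
--             return prefix
--         return f"{prefix} ni {_number_to_bambara(rest)}"
--     if n < 10000:
--         thousands, rest = divmod(n, 1000)
--         prefix = f"{_BIG[1000]} {_ONES.get(thousands, str(thousands))}" if thousands > 1 else _BIG[1000]
--         if rest == 0:
--             return prefix
--         return f"{prefix} ni {_number_to_bambara(rest)}"
--     return str(n)  # fallback for very large numbers
-- ===== SOURCE B (Python) =====
-- _ONES = {
--     0: "furaw", 1: "kelen", 2: "fila", 3: "saba", 4: "naani",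
--     5: "duuru", 6: "wɔɔrɔ", 7: "wolonwula", 8: "seegi", 9: "kɔnɔntɔn",
-- }
--
-- _TENS = {
--     10: "tan", 20: "mugan", 30: "bi saba", 40: "bi naani", 50: "bi duuru",
--     60: "bi wɔɔrɔ", 70: "bi wolonwula", 80: "bi seegi", 90: "bi kɔnɔntɔn",
-- }
--
--
-- def _final_segment(m):
--     """Words for the last 1-99 chunk."""
--     tens, ones = divmod(m, 10)
--     if tens:
--         return _TENS[tens * 10] + (" ni " + _ONES[ones] if ones else "")
--     return _ONES[ones]
--
--
-- def _number_to_bambara(n: int) -> str: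
--     """Convert an integer (0-9999) to Bambara words, iteratively."""
--     if n < 0:
--         return "kɛlɛn kɔnɔ " + _number_to_bambara(-n)
--     if n in _ONES:
--         return _ONES[n]
--     if n >= 10000:
--         return str(n)
--     parts = []
--     for value, big in ((1000, "waa"), (100, "kɛmɛ")):
--         count, n = divmod(n, value)
--         if count > 1:
--             parts.append(big + " " + _ONES[count])
--         elif count == 1:
--             parts.append(big)
--     if n:
--         parts.append(_final_segment(n))
--     return " ni ".join(parts)
-- ===== Notes on version B (the rewrite author's own statement) =====
-- stated objective: simpler
-- what changed: Replaced A's three-branch recursive descent (tens/hundreds/thousands each rebuilding the suffix via a recursive call) by a single iterative peel of place values whose non-empty word segments are collected in a list and joined with ' ni '.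
import Mathlib
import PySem

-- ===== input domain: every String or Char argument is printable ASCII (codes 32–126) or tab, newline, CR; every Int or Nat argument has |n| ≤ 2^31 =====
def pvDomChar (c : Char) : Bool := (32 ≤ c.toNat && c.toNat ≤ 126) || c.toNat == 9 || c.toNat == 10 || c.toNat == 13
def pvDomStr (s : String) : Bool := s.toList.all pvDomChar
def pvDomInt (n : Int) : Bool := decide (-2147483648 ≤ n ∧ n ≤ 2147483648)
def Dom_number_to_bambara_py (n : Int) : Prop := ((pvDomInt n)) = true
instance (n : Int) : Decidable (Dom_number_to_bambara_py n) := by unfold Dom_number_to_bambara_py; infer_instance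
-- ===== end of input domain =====

-- B replaces A's three-branch recursive descent by one iterative peel of place values
-- whose non-empty word segments are joined with " ni " (objective: simpler, same cost).

-- ===== PORT A =====
-- module-level dicts, literal from the Python source
def pvONES : PySem.Dict Int String := PySem.Dict.ofList
  [(0, "furaw"), (1, "kelen"), (2, "fila"), (3, "saba"), (4, "naani"),
   (5, "duuru"), (6, "wɔɔrɔ"), (7, "wolonwula"), (8, "seegi"), (9, "kɔnɔntɔn")]

def pvTENS : PySem.Dict Int String := PySem.Dict.ofList
  [(10, "tan"), (20, "mugan"), (30, "bi saba"), (40, "bi naani"), (50, "bi duuru"),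
   (60, "bi wɔɔrɔ"), (70, "bi wolonwula"), (80, "bi seegi"), (90, "bi kɔnɔntɔn")]

def pvBIG : PySem.Dict Int String := PySem.Dict.ofList [(100, "kɛmɛ"), (1000, "waa")]

-- A, step for step.  The Nat fuel only makes the self-recursion structural; A's
-- recursion depth is at most 3, so the wrapper calls with fuel 4 (never exhausted).
-- 'n in _ONES' is Dict.contains; '_ONES[n]' right after it is getD with an
-- unreachable default (the key was just tested present).
def pvA (fuel : Nat) (n : Int) : String :=
  match fuel with
  | 0 => ""
  | fuel + 1 =>
    if n < 0 then "kɛlɛn kɔnɔ " ++ pvA fuel (-n)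
    else if PySem.Dict.contains pvONES n then PySem.Dict.getD pvONES n ""
    else if n < 100 then
      let tens := PySem.Int.floordiv n 10
      let ones := PySem.Int.mod n 10
      let base := PySem.Dict.getD pvTENS (tens * 10)
        ("bi " ++ PySem.Dict.getD pvONES tens (PySem.Int.toStr tens))
      if ones = 0 then base
      else base ++ " ni " ++ PySem.Dict.getD pvONES ones (PySem.Int.toStr ones)
    else if n < 1000 then
      let hundreds := PySem.Int.floordiv n 100
      let rest := PySem.Int.mod n 100
      let pfx := if hundreds > 1 then PySem.Dict.getD pvBIG 100 "" ++ " " ++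
          PySem.Dict.getD pvONES hundreds (PySem.Int.toStr hundreds)
        else PySem.Dict.getD pvBIG 100 ""
      if rest = 0 then pfx
      else pfx ++ " ni " ++ pvA fuel rest
    else if n < 10000 then
      let thousands := PySem.Int.floordiv n 1000
      let rest := PySem.Int.mod n 1000
      let pfx := if thousands > 1 then PySem.Dict.getD pvBIG 1000 "" ++ " " ++
          PySem.Dict.getD pvONES thousands (PySem.Int.toStr thousands)
        else PySem.Dict.getD pvBIG 1000 ""
      if rest = 0 then pfx
      else pfx ++ " ni " ++ pvA fuel rest
    else PySem.Int.toStr n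

def number_to_bambara_py (n : Int) : String := pvA 4 n

-- ===== PORT B =====
-- Source B's helper _final_segment (direct dict indexing → getD, keys always present)
def pvSeg (m : Int) : String :=
  let tens := PySem.Int.floordiv m 10
  let ones := PySem.Int.mod m 10
  if tens ≠ 0 then
    PySem.Dict.getD pvTENS (tens * 10) "" ++
      (if ones ≠ 0 then " ni " ++ PySem.Dict.getD pvONES ones "" else "")
  else PySem.Dict.getD pvONES ones ""

-- one step of Source B's 'for value, big in ((1000, "waa"), (100, "kɛmɛ"))' loop
def pvPeel (st : List String × Int) (p : Int × String) : List String × Int :=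
  let count := PySem.Int.floordiv st.2 p.1
  let m := PySem.Int.mod st.2 p.1
  if count > 1 then (st.1 ++ [p.2 ++ " " ++ PySem.Dict.getD pvONES count ""], m)
  else if count = 1 then (st.1 ++ [p.2], m)
  else (st.1, m)

-- Source B, step for step; the fuel only makes the single negative-prefix recursion
-- structural (depth ≤ 1, so the wrapper calls with fuel 2)
def pvB (fuel : Nat) (n : Int) : String :=
  match fuel with
  | 0 => ""
  | fuel + 1 =>
    if n < 0 then "kɛlɛn kɔnɔ " ++ pvB fuel (-n)
    else if PySem.Dict.contains pvONES n then PySem.Dict.getD pvONES n ""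
    else if 10000 ≤ n then PySem.Int.toStr n
    else
      let st := [((1000 : Int), "waa"), ((100 : Int), "kɛmɛ")].foldl pvPeel ([], n)
      let parts := if st.2 ≠ 0 then st.1 ++ [pvSeg st.2] else st.1
      PySem.Str.join " ni " parts

def number_to_bambara_py_alt (n : Int) : String := pvB 2 n

-- ===== PRECONDITION & SPEC =====
def Spec_number_to_bambara_py (n : Int) (out : String) : Prop := out = number_to_bambara_py_alt n
instance (n : Int) (out : String) : Decidable (Spec_number_to_bambara_py n out) := by unfold Spec_number_to_bambara_py; infer_instance

-- ===== CLAIM (what is proved, stated in full; the proofs are below) =====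
def Claim_equal_number_to_bambara_py : Prop := ∀ (n : Int), Dom_number_to_bambara_py n → Spec_number_to_bambara_py n (number_to_bambara_py n)

-- ===== LEMMAS AND PROOFS =====

-- proof-only: B's state after the place-value loop, for an argument < 1000
def pvCore100 (r : Int) : List String :=
  let t := pvPeel ([], r) ((100 : Int), "kɛmɛ")
  if t.2 ≠ 0 then t.1 ++ [pvSeg t.2] else t.1

theorem pv_ones_keys : PySem.Dict.keys pvONES = [0, 1, 2, 3, 4, 5, 6, 7, 8, 9] := rfl

theorem pv_containsONES_false {n : Int} (h : 10 ≤ n) :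
    PySem.Dict.contains pvONES n = false := by
  rw [PySem.Dict.contains_eq_decide_mem_keys, pv_ones_keys, decide_eq_false_iff_not]
  simp only [List.mem_cons, List.not_mem_nil, or_false]
  omega

theorem pv_containsONES_true {n : Int} (h0 : 0 ≤ n) (h : n < 10) :
    PySem.Dict.contains pvONES n = true := by
  rw [PySem.Dict.contains_eq_decide_mem_keys, pv_ones_keys, decide_eq_true_eq]
  simp only [List.mem_cons, List.not_mem_nil, or_false]
  omega

theorem pv_notContains {x : Int} (h : 10 ≤ x) : ¬ (PySem.Dict.contains pvONES x = true) := by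
  rw [pv_containsONES_false h]
  exact Bool.false_ne_true

theorem pv_big100 : PySem.Dict.getD pvBIG 100 "" = "kɛmɛ" := rfl
theorem pv_big1000 : PySem.Dict.getD pvBIG 1000 "" = "waa" := rfl

theorem pv_getD_ONES (h : Int) (h1 : 1 ≤ h) (h9 : h ≤ 9) (d : String) :
    PySem.Dict.getD pvONES h d = PySem.Dict.getD pvONES h "" := by
  interval_cases h <;> rfl

theorem pv_getD_TENS (t : Int) (h1 : 1 ≤ t) (h9 : t ≤ 9) (d : String) :
    PySem.Dict.getD pvTENS (t * 10) d = PySem.Dict.getD pvTENS (t * 10) "" := by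
  interval_cases t <;> rfl

theorem pv_mod_bounds (n b : Int) (hb : 0 < b) :
    0 ≤ PySem.Int.mod n b ∧ PySem.Int.mod n b < b := by
  rw [PySem.Int.mod_eq_emod_of_pos hb]
  exact ⟨Int.emod_nonneg n (by omega), Int.emod_lt_of_pos n hb⟩

theorem pv_fdiv_zero {n b : Int} (h0 : 0 ≤ n) (h : n < b) : PySem.Int.floordiv n b = 0 := by
  rw [PySem.Int.floordiv_eq_ediv_of_pos (by omega)]
  exact Int.ediv_eq_zero_of_lt h0 h

theorem pv_mod_id {n b : Int} (h0 : 0 ≤ n) (h : n < b) : PySem.Int.mod n b = n := by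
  rw [PySem.Int.mod_eq_emod_of_pos (by omega)]
  exact Int.emod_eq_of_lt h0 h

theorem pv_fdiv_ge_one {n b : Int} (hb : 0 < b) (h : b ≤ n) : 1 ≤ PySem.Int.floordiv n b :=
  (PySem.Int.le_floordiv_iff_mul_le hb).mpr (by omega)

theorem pv_fdiv_lt {n b q : Int} (hb : 0 < b) (h : n < q * b) : PySem.Int.floordiv n b < q :=
  (PySem.Int.floordiv_lt_iff_lt_mul hb).mpr h

theorem pv_join_singleton (a : String) : PySem.Str.join " ni " [a] = a := by
  simp [PySem.Str.join]

theorem pv_join_cons (a : String) (l : List String) (h : l ≠ []) :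
    PySem.Str.join " ni " (a :: l) = a ++ " ni " ++ PySem.Str.join " ni " l := by
  obtain ⟨b, l', rfl⟩ := List.exists_cons_of_ne_nil h
  apply String.ext
  simp [PySem.Str.toList_join, PySem.Chars.join_cons_cons, String.toList_append]

theorem pv_join_pair (a b : String) : PySem.Str.join " ni " [a, b] = a ++ " ni " ++ b := by
  rw [pv_join_cons a [b] (by simp), pv_join_singleton]

theorem pv_peel_zero (l : List String) (n b : Int) (w : String)
    (h0 : 0 ≤ n) (h : n < b) (_hb : 0 < b) : pvPeel (l, n) (b, w) = (l, n) := by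
  simp only [pvPeel]
  rw [pv_fdiv_zero h0 h, pv_mod_id h0 h]
  norm_num

theorem pv_peel_big (l : List String) (n b : Int) (w : String) (_hb : 0 < b) :
    pvPeel (l, n) (b, w) =
      (l ++ (if PySem.Int.floordiv n b > 1 then
              [w ++ " " ++ PySem.Dict.getD pvONES (PySem.Int.floordiv n b) ""]
            else if PySem.Int.floordiv n b = 1 then [w] else []),
       PySem.Int.mod n b) := by
  simp only [pvPeel]
  split_ifs <;> simp

-- the low words: A's 1–99 branch equals B's _final_segment, at any sufficient fuel
theorem pv_L_low (f : Nat) (n : Int) (h0 : 0 ≤ n) (h2 : n < 100) :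
    pvA (f + 1) n = pvSeg n := by
  simp only [pvA, pvSeg]
  rw [if_neg (by omega : ¬ n < 0)]
  by_cases hn : n < 10
  · rw [if_pos (pv_containsONES_true h0 hn), pv_fdiv_zero h0 hn, pv_mod_id h0 hn,
      if_neg (by omega : ¬ (0 : Int) ≠ 0)]
  · have h10 : (10 : Int) ≤ n := by omega
    have ht1 : 1 ≤ PySem.Int.floordiv n 10 := pv_fdiv_ge_one (by norm_num) h10
    have ht9 : PySem.Int.floordiv n 10 < 10 := pv_fdiv_lt (by norm_num) (by omega)
    obtain ⟨ho0, ho9⟩ := pv_mod_bounds n 10 (by norm_num)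
    rw [if_neg (pv_notContains h10), if_pos h2,
      if_pos (by omega : PySem.Int.floordiv n 10 ≠ 0)]
    by_cases hz : PySem.Int.mod n 10 = 0
    · rw [if_pos hz, if_neg (not_not.mpr hz), String.append_empty,
        pv_getD_TENS _ ht1 (by omega)]
    · rw [if_neg hz, if_pos hz, String.append_assoc,
        pv_getD_TENS _ ht1 (by omega), pv_getD_ONES _ (by omega) (by omega)]

-- B on 0 ≤ n < 100 is exactly _final_segment
theorem pv_B_low (n : Int) (h0 : 0 ≤ n) (h2 : n < 100) : pvB 1 n = pvSeg n := by
  simp only [pvB]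
  rw [if_neg (by omega : ¬ n < 0)]
  by_cases hn : n < 10
  · rw [if_pos (pv_containsONES_true h0 hn)]
    simp only [pvSeg]
    rw [pv_fdiv_zero h0 hn, pv_mod_id h0 hn, if_neg (by omega : ¬ (0 : Int) ≠ 0)]
  · have h10 : (10 : Int) ≤ n := by omega
    rw [if_neg (pv_notContains h10), if_neg (by omega : ¬ 10000 ≤ n)]
    simp only [List.foldl]
    rw [pv_peel_zero [] n 1000 "waa" h0 (by omega) (by norm_num),
      pv_peel_zero [] n 100 "kɛmɛ" h0 (by omega) (by norm_num)]
    dsimp only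
    rw [if_pos (by omega : n ≠ 0)]
    simp only [List.nil_append]
    exact pv_join_singleton _

-- B on 100 ≤ n < 1000: the thousands peel is a no-op
theorem pv_B_mid (n : Int) (h : 100 ≤ n) (h3 : n < 1000) :
    pvB 1 n = PySem.Str.join " ni " (pvCore100 n) := by
  simp only [pvB]
  rw [if_neg (by omega : ¬ n < 0),
    if_neg (pv_notContains (show (10 : Int) ≤ n by omega)),
    if_neg (by omega : ¬ 10000 ≤ n)]
  simp only [List.foldl]
  rw [pv_peel_zero [] n 1000 "waa" (by omega) (by omega) (by norm_num)]
  simp only [pvCore100]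

theorem pv_core_ne (r : Int) (h1 : 1 ≤ r) (h3 : r < 1000) : pvCore100 r ≠ [] := by
  by_cases hr : r < 100
  · simp only [pvCore100]
    rw [pv_peel_zero [] r 100 "kɛmɛ" (by omega) hr (by norm_num)]
    dsimp only
    rw [if_pos (by omega : r ≠ 0)]
    simp
  · have hh1 : 1 ≤ PySem.Int.floordiv r 100 := pv_fdiv_ge_one (by norm_num) (by omega)
    simp only [pvCore100]
    rw [pv_peel_big [] r 100 "kɛmɛ" (by norm_num)]
    dsimp only
    split_ifs <;> simp_all
    omega

-- the middle layer: joined parts of a 1–999 argument equal A's value there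
theorem pv_M_hun (f : Nat) (r : Int) (h1 : 1 ≤ r) (h3 : r < 1000) :
    PySem.Str.join " ni " (pvCore100 r) = pvA (f + 2) r := by
  by_cases hr : r < 100
  · simp only [pvCore100]
    rw [pv_peel_zero [] r 100 "kɛmɛ" (by omega) hr (by norm_num)]
    dsimp only
    rw [if_pos (by omega : r ≠ 0)]
    simp only [List.nil_append]
    rw [pv_join_singleton, show f + 2 = (f + 1) + 1 by omega]
    exact (pv_L_low (f + 1) r (by omega) hr).symm
  · have hh1 : 1 ≤ PySem.Int.floordiv r 100 := pv_fdiv_ge_one (by norm_num) (by omega)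
    have hh9 : PySem.Int.floordiv r 100 < 10 := pv_fdiv_lt (by norm_num) (by omega)
    obtain ⟨hm0, hm99⟩ := pv_mod_bounds r 100 (by norm_num)
    generalize hgf : f + 1 = g
    rw [show f + 2 = g + 1 by omega]
    simp only [pvA, pvCore100]
    rw [pv_peel_big [] r 100 "kɛmɛ" (by norm_num)]
    rw [if_neg (by omega : ¬ r < 0),
      if_neg (pv_notContains (show (10 : Int) ≤ r by omega)),
      if_neg (by omega : ¬ r < 100), if_pos h3]
    dsimp only
    by_cases hh : PySem.Int.floordiv r 100 > 1
    · rw [if_pos hh, if_pos hh]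
      simp only [List.nil_append]
      by_cases hz : PySem.Int.mod r 100 = 0
      · rw [if_neg (not_not.mpr hz), if_pos hz, pv_join_singleton, pv_big100,
          pv_getD_ONES (PySem.Int.floordiv r 100) (by omega) (by omega) (PySem.Int.toStr (PySem.Int.floordiv r 100))]
      · rw [if_pos hz, if_neg hz, List.singleton_append, pv_join_pair, pv_big100,
          pv_getD_ONES (PySem.Int.floordiv r 100) (by omega) (by omega) (PySem.Int.toStr (PySem.Int.floordiv r 100)), ← hgf,
          pv_L_low f _ (by omega) (by omega)]
    · rw [if_neg hh, if_neg hh, if_pos (by omega : PySem.Int.floordiv r 100 = 1)]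
      simp only [List.nil_append]
      by_cases hz : PySem.Int.mod r 100 = 0
      · rw [if_neg (not_not.mpr hz), if_pos hz, pv_join_singleton, pv_big100]
      · rw [if_pos hz, if_neg hz, List.singleton_append, pv_join_pair, pv_big100, ← hgf,
          pv_L_low f _ (by omega) (by omega)]

-- the top layer: 1000–9999
theorem pv_peel_cons (w : String) (m : Int) (p : Int × String) :
    pvPeel ([w], m) p = ((w :: (pvPeel ([], m) p).1), (pvPeel ([], m) p).2) := by
  simp only [pvPeel]
  split_ifs <;> simp

theorem pv_ite_cons (c : Prop) [Decidable c] (w s : String) (A B : List String) :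
    (if c then (w :: A) ++ [s] else w :: B) = w :: (if c then A ++ [s] else B) := by
  split_ifs <;> simp

theorem pv_E_thou (f : Nat) (n : Int) (h : 1000 ≤ n) (h4 : n < 10000) :
    pvB 1 n = pvA (f + 3) n := by
  have ht1 : 1 ≤ PySem.Int.floordiv n 1000 := pv_fdiv_ge_one (by norm_num) h
  have ht9 : PySem.Int.floordiv n 1000 < 10 := pv_fdiv_lt (by norm_num) (by omega)
  obtain ⟨hr0, hr999⟩ := pv_mod_bounds n 1000 (by norm_num)
  generalize hgf : f + 2 = g
  rw [show f + 3 = g + 1 by omega]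
  have key : ∀ w : String,
      PySem.Str.join " ni "
        (if (pvPeel ([w], PySem.Int.mod n 1000) ((100 : Int), "kɛmɛ")).2 ≠ 0 then
          (pvPeel ([w], PySem.Int.mod n 1000) ((100 : Int), "kɛmɛ")).1 ++
            [pvSeg (pvPeel ([w], PySem.Int.mod n 1000) ((100 : Int), "kɛmɛ")).2]
        else (pvPeel ([w], PySem.Int.mod n 1000) ((100 : Int), "kɛmɛ")).1) =
      (if PySem.Int.mod n 1000 = 0 then w
       else w ++ " ni " ++ pvA (f + 2) (PySem.Int.mod n 1000)) := by
    intro w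
    rw [pv_peel_cons w (PySem.Int.mod n 1000) ((100 : Int), "kɛmɛ")]
    dsimp only
    rw [pv_ite_cons]
    by_cases hz : PySem.Int.mod n 1000 = 0
    · rw [if_pos hz, hz, pv_peel_zero [] 0 100 "kɛmɛ" (by omega) (by omega) (by norm_num)]
      dsimp only
      rw [if_neg (by omega : ¬ (0 : Int) ≠ 0)]
      exact pv_join_singleton w
    · rw [if_neg hz]
      have hcore : pvCore100 (PySem.Int.mod n 1000) =
          (if (pvPeel ([], PySem.Int.mod n 1000) ((100 : Int), "kɛmɛ")).2 ≠ 0 then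
            (pvPeel ([], PySem.Int.mod n 1000) ((100 : Int), "kɛmɛ")).1 ++
              [pvSeg (pvPeel ([], PySem.Int.mod n 1000) ((100 : Int), "kɛmɛ")).2]
          else (pvPeel ([], PySem.Int.mod n 1000) ((100 : Int), "kɛmɛ")).1) := by
        simp only [pvCore100]
      rw [← hcore, pv_join_cons w _ (pv_core_ne _ (by omega) (by omega)),
        pv_M_hun f _ (by omega) (by omega)]
  have hB : pvB 1 n =
      (if PySem.Int.mod n 1000 = 0 then
        (if PySem.Int.floordiv n 1000 > 1 then
          "waa" ++ " " ++ PySem.Dict.getD pvONES (PySem.Int.floordiv n 1000) ""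
        else "waa")
       else
        (if PySem.Int.floordiv n 1000 > 1 then
          "waa" ++ " " ++ PySem.Dict.getD pvONES (PySem.Int.floordiv n 1000) ""
        else "waa") ++ " ni " ++ pvA (f + 2) (PySem.Int.mod n 1000)) := by
    simp only [pvB]
    rw [if_neg (by omega : ¬ n < 0),
      if_neg (pv_notContains (show (10 : Int) ≤ n by omega)),
      if_neg (by omega : ¬ 10000 ≤ n)]
    simp only [List.foldl]
    rw [pv_peel_big [] n 1000 "waa" (by norm_num)]
    simp only [List.nil_append]
    by_cases hh : PySem.Int.floordiv n 1000 > 1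
    · rw [if_pos hh, if_pos hh, key]
    · rw [if_neg hh, if_neg hh, if_pos (show PySem.Int.floordiv n 1000 = 1 by omega), key]
  rw [hB, hgf]
  simp only [pvA]
  rw [if_neg (by omega : ¬ n < 0),
    if_neg (pv_notContains (show (10 : Int) ≤ n by omega)),
    if_neg (by omega : ¬ n < 100), if_neg (by omega : ¬ n < 1000), if_pos h4]
  by_cases hz : PySem.Int.mod n 1000 = 0
  · rw [if_pos hz, if_pos hz]
    by_cases hh : PySem.Int.floordiv n 1000 > 1
    · rw [if_pos hh, if_pos hh, pv_big1000,
        pv_getD_ONES (PySem.Int.floordiv n 1000) (by omega) (by omega) (PySem.Int.toStr (PySem.Int.floordiv n 1000))]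
    · rw [if_neg hh, if_neg hh, pv_big1000]
  · rw [if_neg hz, if_neg hz]
    by_cases hh : PySem.Int.floordiv n 1000 > 1
    · rw [if_pos hh, if_pos hh, pv_big1000,
        pv_getD_ONES (PySem.Int.floordiv n 1000) (by omega) (by omega) (PySem.Int.toStr (PySem.Int.floordiv n 1000))]
    · rw [if_neg hh, if_neg hh, pv_big1000]

-- whole nonnegative sub-10000 range
theorem pv_E (f : Nat) (n : Int) (h0 : 0 ≤ n) (h4 : n < 10000) :
    pvB 1 n = pvA (f + 3) n := by
  by_cases h : n < 100
  · rw [pv_B_low n h0 h, show f + 3 = (f + 2) + 1 by omega, pv_L_low (f + 2) n h0 h]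
  · by_cases h3 : n < 1000
    · rw [pv_B_mid n (by omega) h3, show f + 3 = (f + 1) + 2 by omega,
        pv_M_hun (f + 1) n (by omega) h3]
    · exact pv_E_thou f n (by omega) h4

theorem pvB_fuel (f : Nat) (n : Int) (h0 : ¬ n < 0) : pvB (f + 1) n = pvB 1 n := by
  rw [show (1 : Nat) = 0 + 1 from rfl]
  simp only [pvB]
  rw [if_neg h0, if_neg h0]

theorem pvA_big (f : Nat) (n : Int) (h : 10000 ≤ n) : pvA (f + 1) n = PySem.Int.toStr n := by
  simp only [pvA]
  rw [if_neg (by omega : ¬ n < 0),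
    if_neg (pv_notContains (show (10 : Int) ≤ n by omega)),
    if_neg (by omega : ¬ n < 100), if_neg (by omega : ¬ n < 1000),
    if_neg (by omega : ¬ n < 10000)]

theorem pvB_big (f : Nat) (n : Int) (h : 10000 ≤ n) : pvB (f + 1) n = PySem.Int.toStr n := by
  simp only [pvB]
  rw [if_neg (by omega : ¬ n < 0),
    if_neg (pv_notContains (show (10 : Int) ≤ n by omega)),
    if_pos h]

-- ===== VERDICT (by name: the statement is the Claim_ definition above) =====
theorem number_to_bambara_py_spec : Claim_equal_number_to_bambara_py := by
  intro n _
  unfold Spec_number_to_bambara_py number_to_bambara_py number_to_bambara_py_alt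
  by_cases hneg : n < 0
  · rw [show (4 : Nat) = 3 + 1 from rfl, show (2 : Nat) = 1 + 1 from rfl, pvA, pvB,
      if_pos hneg, if_pos hneg]
    by_cases hbig : -n < 10000
    · have he := pv_E 0 (-n) (by omega) hbig
      rw [show (0 : Nat) + 3 = 2 + 1 from rfl] at he
      rw [show (3 : Nat) = 2 + 1 from rfl, ← he]
    · rw [show (3 : Nat) = 2 + 1 from rfl, pvA_big 2 (-n) (by omega),
        show (1 : Nat) = 0 + 1 from rfl, pvB_big 0 (-n) (by omega)]
  · by_cases hbig : n < 10000
    · have he := pv_E 1 n (by omega) hbig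
      rw [show (1 : Nat) + 3 = 4 from rfl] at he
      rw [← he, show (2 : Nat) = 1 + 1 from rfl, pvB_fuel 1 n hneg]
    · rw [show (4 : Nat) = 3 + 1 from rfl, pvA_big 3 n (by omega),
        show (2 : Nat) = 1 + 1 from rfl, pvB_big 1 n (by omega)]
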